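-- pv_equiv track=rewrite | github.com/tassosblackg/AIDA_projects | AIDA04/project_w10/knap_improve.py | init_heuristic_solutionW
-- ===== SOURCE A (Python) =====
-- def init_heuristic_solutionW(capacity, weights):
--     '''
--     Args:
--         - capacity : a int value showing the maximum capacity of the sack
--         - weights  : a list with weight values per item
--
--     Returns:
--         - solution : a list with ones and zeros, [1]: element in sack [0]: element not inside
--     '''
--     total_sum_w = sum(weights) # calculate total sum of weights
--     solution = [1]*len(weights) # suppose best solution all objects in
--     current_sum = total_sum_w
--     sublistOfWeights = weights
--
--     while(current_sum > capacity):
--         max_Weight = max(sublistOfWeights)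
--         indexOfdroppedElement = sublistOfWeights.index(max_Weight) # get index of max weight value
--         sublistOfWeights[indexOfdroppedElement] = 0
--         current_sum = sum(sublistOfWeights) # new sum after removed element
--
--         solution[indexOfdroppedElement] = 0
--
--     return solution
-- ===== SOURCE B (Python) =====
-- # B: sort indices once by descending weight (stable => ties by index), then drop in one
-- # pass with a running sum, instead of A's rescan of the mutated list per dropped item.
-- # Unlike A, B does not mutate `weights` in place; the equivalence claim is about the
-- # return value.
-- def init_heuristic_solutionW(capacity, weights):
--     solution = [1] * len(weights)
--     s = sum(weights)
--     if s <= capacity: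
--         return solution
--     for i, w in sorted(enumerate(weights), key=lambda iw: -iw[1]):
--         if s <= capacity:
--             break
--         s -= w
--         solution[i] = 0
--     return solution
-- ===== Notes on version B (the rewrite author's own statement) =====
-- stated objective: alternative
-- what changed: B replaces A's repeated max()+index() scans over the mutated list by one stable sort of (index, weight) pairs by descending weight and a single pass with a running sum (O(n log n) sort instead of a rescan per dropped item; a timing run did not consistently confirm a speed-up, so none is claimed); B does not mutate the weights argument in place (A zeroes dropped entries), the claim is about the return value.
import Mathlib
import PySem

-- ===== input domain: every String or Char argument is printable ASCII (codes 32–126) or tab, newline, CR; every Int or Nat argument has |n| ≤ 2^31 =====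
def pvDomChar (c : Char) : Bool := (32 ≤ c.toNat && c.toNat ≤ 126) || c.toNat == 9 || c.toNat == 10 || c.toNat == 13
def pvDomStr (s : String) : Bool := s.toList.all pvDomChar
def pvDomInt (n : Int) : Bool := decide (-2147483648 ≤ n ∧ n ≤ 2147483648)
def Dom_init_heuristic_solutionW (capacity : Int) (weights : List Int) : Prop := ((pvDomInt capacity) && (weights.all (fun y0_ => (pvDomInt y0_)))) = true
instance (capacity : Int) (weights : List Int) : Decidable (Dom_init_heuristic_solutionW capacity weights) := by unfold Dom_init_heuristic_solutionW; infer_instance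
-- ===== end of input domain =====

-- B replaces A's repeated max()+index() scans over the mutated list by one stable sort of
-- (index, weight) pairs and a single pass with a running sum; A mutates `weights` in place
-- (zeroes dropped entries), B does not — the equivalence proved here is about the return value.

-- ===== PORT A =====
-- A's while loop, ported with a fuel counter (weights.length iterations suffice on every
-- input Pre_ admits; on inputs outside Pre_ the Python loop never returns, so nothing is claimed).
def pvALoop (capacity : Int) : Nat → List Int → List Int → List Int
  | 0, _, solution => solution
  | fuel + 1, sublist, solution =>
    if sublist.sum > capacity then
      match PySem.List.max? sublist (fun x => x) with
      | none => solution            -- Python: max([]) raises ValueError (outside Pre_)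
      | some m =>
        match PySem.List.index? sublist m with
        | none => solution          -- unreachable: m is an element of sublist
        | some idx => pvALoop capacity fuel (sublist.set idx 0) (solution.set idx 0)
    else solution

def init_heuristic_solutionW (capacity : Int) (weights : List Int) : List Int :=
  pvALoop capacity weights.length weights (List.replicate weights.length 1)

-- ===== PORT B =====
def pvBLoop (capacity : Int) : List (Int × Int) → Int → List Int → List Int
  | [], _, solution => solution
  | (i, w) :: rest, s, solution =>
    if s ≤ capacity then solution
    else pvBLoop capacity rest (s - w) (solution.set i.toNat 0)

def init_heuristic_solutionW_alt (capacity : Int) (weights : List Int) : List Int :=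
  let solution := List.replicate weights.length 1
  let s := weights.sum
  if s ≤ capacity then solution
  else
    pvBLoop capacity
      (PySem.List.sorted (PySem.List.enumerate weights 0) (fun iw => -iw.2) false)
      s solution

-- ===== PRECONDITION & SPEC =====
-- Pre_ excludes exactly the inputs on which A returns nothing: if the sum of the
-- nonpositive weights exceeds capacity, A's while loop never terminates (it re-picks a
-- zeroed/nonpositive max forever), and with weights = [] and capacity < 0, max([]) raises.
def Pre_init_heuristic_solutionW (capacity : Int) (weights : List Int) : Prop :=
  (weights.filter (fun w => w ≤ 0)).sum ≤ capacity
instance (capacity : Int) (weights : List Int) : Decidable (Pre_init_heuristic_solutionW capacity weights) := by unfold Pre_init_heuristic_solutionW; infer_instance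

def pvWitness_init_heuristic_solutionW : Int × List Int := (5, [3, 4, -1])

def Spec_init_heuristic_solutionW (capacity : Int) (weights : List Int) (out : List Int) : Prop := out = init_heuristic_solutionW_alt capacity weights
instance (capacity : Int) (weights : List Int) (out : List Int) : Decidable (Spec_init_heuristic_solutionW capacity weights out) := by unfold Spec_init_heuristic_solutionW; infer_instance

-- ===== CLAIM (what is proved, stated in full; the proofs are below) =====
def Claim_equal_init_heuristic_solutionW : Prop := ∀ (capacity : Int) (weights : List Int), Dom_init_heuristic_solutionW capacity weights → Pre_init_heuristic_solutionW capacity weights → Spec_init_heuristic_solutionW capacity weights (init_heuristic_solutionW capacity weights)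


-- ===== LEMMAS AND PROOFS =====

-- the order B's stable sort produces: strictly heavier first, ties by original index
def pvLex (a b : Int × Int) : Prop := b.2 < a.2 ∨ (a.2 = b.2 ∧ a.1 < b.1)

theorem pv_insertBy_pairwise (x : Int × Int) (acc : List (Int × Int))
    (hp : acc.Pairwise pvLex) (hfst : ∀ a ∈ acc, a.1 < x.1) :
    (PySem.List.insertBy (fun a b => decide (-a.2 < -b.2)) x acc).Pairwise pvLex := by
  induction acc with
  | nil => simp [PySem.List.insertBy]
  | cons y t ih =>
    rw [List.pairwise_cons] at hp
    simp only [PySem.List.insertBy]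
    by_cases hxy : -x.2 < -y.2
    · rw [if_pos (by simpa using hxy)]
      refine List.pairwise_cons.mpr ⟨?_, List.pairwise_cons.mpr ⟨hp.1, hp.2⟩⟩
      intro z hz
      rcases List.mem_cons.mp hz with rfl | hz
      · exact Or.inl (by omega)
      · rcases hp.1 z hz with h | ⟨h1, _⟩
        · exact Or.inl (by simp only [pvLex] at *; omega)
        · exact Or.inl (by simp only [pvLex] at *; omega)
    · rw [if_neg (by simpa using hxy)]
      refine List.pairwise_cons.mpr
        ⟨?_, ih hp.2 (fun a ha => hfst a (List.mem_cons_of_mem y ha))⟩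
      intro z hz
      rw [PySem.List.mem_insertBy] at hz
      rcases hz with rfl | hz
      · have hxle : z.2 ≤ y.2 := by omega
        rcases lt_or_eq_of_le hxle with h | h
        · exact Or.inl h
        · exact Or.inr ⟨h.symm, hfst y List.mem_cons_self⟩
      · exact hp.1 z hz

theorem pv_foldl_ins (xs : List (Int × Int)) (h : xs.Pairwise (fun p q => p.1 < q.1)) :
    ∀ acc, acc.Pairwise pvLex → (∀ a ∈ acc, ∀ q ∈ xs, a.1 < q.1) →
    (xs.foldl (fun acc x => PySem.List.insertBy (fun a b => decide (-a.2 < -b.2)) x acc)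
      acc).Pairwise pvLex := by
  induction xs with
  | nil => intro acc h1 _; simpa using h1
  | cons x t ih =>
    intro acc h1 h2
    rw [List.pairwise_cons] at h
    rw [List.foldl_cons]
    refine ih h.2 _ (pv_insertBy_pairwise x acc h1 (fun a ha => h2 a ha x List.mem_cons_self)) ?_
    intro a ha q hq
    rw [PySem.List.mem_insertBy] at ha
    rcases ha with rfl | ha
    · exact h.1 q hq
    · exact h2 a ha q (List.mem_cons_of_mem x hq)

theorem pv_sorted_stable (xs : List (Int × Int)) (h : xs.Pairwise (fun p q => p.1 < q.1)) :
    (PySem.List.sorted xs (fun p => -p.2) false).Pairwise pvLex := by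
  rw [PySem.List.sorted_eq_foldl_insertBy]
  exact pv_foldl_ins xs h [] (by simp) (by simp)

theorem pv_index?_first (xs : List Int) (v : Int) (k : Nat) (hk : k < xs.length)
    (hv : xs[k] = v) (hfirst : ∀ j (hj : j < k), xs[j]'(by omega) ≠ v) :
    PySem.List.index? xs v = some k := by
  rw [PySem.List.index?_eq_some_iff]
  refine ⟨xs.take k, xs.drop (k + 1), ?_, ?_, ?_⟩
  · conv_lhs => rw [← List.take_append_drop k xs, ← List.getElem_cons_drop hk]
    rw [hv]
  · simp [Nat.le_of_lt hk]
  · intro hmem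
    obtain ⟨j, hj, hje⟩ := List.mem_iff_getElem.mp hmem
    have hjk : j < k := by simp at hj; omega
    apply hfirst j hjk
    rw [← hje, List.getElem_take]

theorem pv_enum_filter_nonpos (ws : List Int) (s : Int) :
    ((PySem.List.enumerate ws s).filter (fun p => p.2 ≤ 0)).map (fun p => p.2)
      = ws.filter (fun w => w ≤ 0) := by
  induction ws generalizing s with
  | nil => simp [PySem.List.enumerate]
  | cons w t ih =>
    rw [PySem.List.enumerate_cons]
    by_cases hw : w ≤ 0
    · simp only [List.filter_cons, decide_eq_true_eq]
      rw [if_pos (by simpa using hw), if_pos (by simpa using hw)]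
      simp [ih]
    · simp only [List.filter_cons, decide_eq_true_eq]
      rw [if_neg (by simpa using hw), if_neg (by simpa using hw)]
      exact ih _

-- main loop correspondence: A's while loop on the mutated list equals B's pass over the
-- not-yet-dropped suffix `rest` of the stably sorted (index, weight) pairs
theorem pv_loop_eq (capacity : Int) (weights : List Int)
    (hpre : (weights.filter (fun w => w ≤ 0)).sum ≤ capacity) :
    ∀ (rest : List (Int × Int)) (fuel : Nat) (sub sol : List Int),
    rest.length ≤ fuel →
    sub.length = weights.length →
    (∀ k (hk : k < weights.length),
        sub[k]? = some (if (↑k : Int) ∈ rest.map (fun p => p.1) then weights[k] else 0)) →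
    sub.sum = (rest.map (fun p => p.2)).sum →
    rest.Pairwise pvLex →
    (∀ p ∈ rest, ∃ (k : Nat) (hk : k < weights.length), p = ((k : Int), weights[k])) →
    (rest.map (fun p => p.1)).Nodup →
    (∀ k (hk : k < weights.length), weights[k] ≤ 0 → (↑k : Int) ∈ rest.map (fun p => p.1)) →
    pvALoop capacity fuel sub sol = pvBLoop capacity rest sub.sum sol := by
  intro rest
  induction rest with
  | nil =>
    intro fuel sub sol _ hlen hmask hsum _ _ _ hnp
    have hfil : weights.filter (fun w => w ≤ 0) = [] := by
      rw [List.filter_eq_nil_iff]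
      intro a ha
      obtain ⟨k, hk, rfl⟩ := List.mem_iff_getElem.mp ha
      simp only [decide_eq_true_eq]
      intro hle
      simpa using hnp k hk hle
    have hcap : (0 : Int) ≤ capacity := by rw [hfil] at hpre; simpa using hpre
    have hsum0 : sub.sum = 0 := by simpa using hsum
    have hno : ¬ (sub.sum > capacity) := by omega
    cases fuel with
    | zero => simp [pvALoop, pvBLoop]
    | succ f => simp only [pvALoop, pvBLoop]; rw [if_neg hno]
  | cons hd rest' ih =>
    intro fuel sub sol hfuel hlen hmask hsum hpw hmem hnd hnp
    obtain ⟨i, w⟩ := hd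
    obtain ⟨k₀, hk₀, hpair⟩ := hmem (i, w) List.mem_cons_self
    have hi : i = (k₀ : Int) := by
      have := congrArg Prod.fst hpair; simpa using this
    have hw : w = weights[k₀] := by
      have := congrArg Prod.snd hpair; simpa using this
    cases fuel with
    | zero => simp at hfuel
    | succ f =>
      by_cases hs : sub.sum ≤ capacity
      · simp only [pvALoop, pvBLoop]
        rw [if_neg (by omega), if_pos hs]
      · push_neg at hs
        have hk₀mem : ((k₀ : Int)) ∈ ((i, w) :: rest').map (fun p => p.1) :=
          List.mem_map.mpr ⟨(i, w), List.mem_cons_self, by exact hi⟩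
        have hklen : k₀ < sub.length := by omega
        have hsubk : sub[k₀] = w := by
          have h := hmask k₀ hk₀
          rw [List.getElem?_eq_getElem hklen, if_pos hk₀mem] at h
          rw [Option.some.injEq] at h
          rw [h, hw]
        -- every retained entry of sub is the pair in rest at its index; zeroed entries are 0
        have hentry : ∀ j (hj : j < weights.length),
            sub[j]'(by omega) = 0 ∨
            ((((j : Int)), sub[j]'(by omega)) ∈ ((i, w) :: rest' : List (Int × Int)) ∧
              sub[j]'(by omega) = weights[j]) := by
          intro j hj
          have hmj := hmask j hj
          rw [List.getElem?_eq_getElem (by omega : j < sub.length)] at hmj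
          by_cases hin : ((j : Int)) ∈ ((i, w) :: rest').map (fun p => p.1)
          · rw [if_pos hin, Option.some.injEq] at hmj
            right
            refine ⟨?_, hmj⟩
            obtain ⟨q, hq, hq1⟩ := List.mem_map.mp hin
            obtain ⟨k', hk', hqe⟩ := hmem q hq
            subst hqe
            have hkj : k' = j := by
              have h1 : ((k' : Int)) = (j : Int) := by simpa using hq1
              exact_mod_cast h1
            subst hkj
            rw [hmj]
            exact hq
          · rw [if_neg hin, Option.some.injEq] at hmj
            left
            exact hmj
        have hle_w : ∀ p ∈ ((i, w) :: rest' : List (Int × Int)), p.2 ≤ w := by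
          intro p hp
          rcases List.mem_cons.mp hp with rfl | hp
          · exact le_refl _
          · have hpl := (List.pairwise_cons.mp hpw).1 p hp
            simp only [pvLex] at hpl
            rcases hpl with h | ⟨h1, _⟩
            · exact le_of_lt h
            · exact le_of_eq h1.symm
        -- the head weight is positive (else rest is exactly the nonpositive pairs and
        -- the running sum would already be ≤ capacity)
        have hw0 : 0 < w := by
          by_contra hle
          push_neg at hle
          have hall : ∀ p ∈ ((i, w) :: rest' : List (Int × Int)), p.2 ≤ 0 :=
            fun p hp => le_trans (hle_w p hp) hle
          have hnodup1 : ((i, w) :: rest' : List (Int × Int)).Nodup :=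
            List.Nodup.of_map _ hnd
          have hnodup2 :
              ((PySem.List.enumerate weights 0).filter (fun p => p.2 ≤ 0)).Nodup := by
            refine List.Nodup.filter _ (List.Nodup.of_map (fun p => p.1) ?_)
            rw [PySem.List.map_fst_enumerate]
            exact PySem.List.nodup_pyRange_one _ _
          have hpm : ((i, w) :: rest' : List (Int × Int)).Perm
              ((PySem.List.enumerate weights 0).filter (fun p => p.2 ≤ 0)) := by
            rw [List.perm_ext_iff_of_nodup hnodup1 hnodup2]
            intro p
            constructor
            · intro hp
              rw [List.mem_filter]
              obtain ⟨k, hk, rfl⟩ := hmem p hp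
              refine ⟨(PySem.List.mem_enumerate_iff _ _ _).mpr ⟨k, hk, by simp⟩, ?_⟩
              simpa using hall _ hp
            · intro hp
              rw [List.mem_filter] at hp
              obtain ⟨k, hk, hpk⟩ := (PySem.List.mem_enumerate_iff _ _ _).mp hp.1
              have hk0 : weights[k] ≤ 0 := by
                have h2 := hp.2
                rw [hpk] at h2
                simpa using h2
              obtain ⟨q, hq, hq1⟩ := List.mem_map.mp (hnp k hk hk0)
              obtain ⟨k', hk', hqe⟩ := hmem q hq
              subst hqe
              have hkk : k' = k := by
                have h1 : ((k' : Int)) = (k : Int) := by simpa using hq1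
                exact_mod_cast h1
              subst hkk
              have hpq : p = (((k' : Int)), weights[k']) := by rw [hpk]; simp
              rw [hpq]
              exact hq
          have heq : sub.sum = (weights.filter (fun w => w ≤ 0)).sum := by
            rw [hsum, ← pv_enum_filter_nonpos weights 0]
            exact (hpm.map (fun p => p.2)).sum_eq
          omega
        -- max(sublist) = w
        have hwmem : w ∈ sub := hsubk ▸ List.getElem_mem hklen
        have hmax : PySem.List.max? sub (fun x => x) = some w := by
          cases hmq : PySem.List.max? sub (fun x => x) with
          | none =>
            rw [PySem.List.max?_eq_none_iff] at hmq
            rw [hmq] at hwmem; simp at hwmem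
          | some m =>
            have hmaxle : ∀ y ∈ sub, y ≤ m := by
              have := PySem.List.max?_isMax hmq; simpa using this
            have hwm : w ≤ m := hmaxle w hwmem
            have hmw : m ≤ w := by
              obtain ⟨j, hj, rfl⟩ := List.mem_iff_getElem.mp (PySem.List.max?_mem hmq)
              rcases hentry j (by omega) with h0 | ⟨hin, _⟩
              · omega
              · exact hle_w _ hin
            rw [le_antisymm hmw hwm]
        -- sublist.index(w) = k₀ (earlier retained slots are strictly heavier, zeroed are 0 < w)
        have hidx : PySem.List.index? sub w = some k₀ := by
          refine pv_index?_first sub w k₀ hklen hsubk ?_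
          intro j hj hjw
          have hjlt : j < weights.length := by omega
          rcases hentry j hjlt with h0 | ⟨hin, _⟩
          · omega
          · rw [hjw] at hin
            rcases List.mem_cons.mp hin with hhd | htl
            · have h1 : ((j : Int)) = i := by
                have := congrArg Prod.fst hhd; simpa using this
              have : j = k₀ := by rw [hi] at h1; exact_mod_cast h1
              omega
            · have hpl := (List.pairwise_cons.mp hpw).1 _ htl
              simp only [pvLex] at hpl
              rcases hpl with h | ⟨_, h2⟩
              · simp at h
              · have h3 : ((k₀ : Int)) < (j : Int) := by
                  rw [hi] at h2; simpa using h2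
                have : k₀ < j := by exact_mod_cast h3
                omega
        -- one step of each loop, then the induction hypothesis
        have hstepA : pvALoop capacity (f + 1) sub sol
            = pvALoop capacity f (sub.set k₀ 0) (sol.set k₀ 0) := by
          simp only [pvALoop]
          rw [if_pos (by omega : sub.sum > capacity)]
          simp only [hmax, hidx]
        have hsum' : (sub.set k₀ 0).sum = sub.sum - w := by
          rw [List.sum_set', dif_pos hklen, hsubk]
          ring
        have hnotin : ((k₀ : Int)) ∉ rest'.map (fun p => p.1) := by
          have h2 : (i :: rest'.map (fun p => p.1)).Nodup := by simpa using hnd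
          rw [hi] at h2
          exact (List.nodup_cons.mp h2).1
        have hrec := ih f (sub.set k₀ 0) (sol.set k₀ 0)
          (by simpa using hfuel)
          (by simpa using hlen)
          (by
            intro k hk
            by_cases hkk : k = k₀
            · subst hkk
              rw [if_neg hnotin, List.getElem?_set_self]
              omega
            · rw [List.getElem?_set_ne (by omega : k₀ ≠ k)]
              rw [hmask k hk]
              have hki : ((k : Int)) ≠ i := by
                rw [hi]
                intro hcon
                exact hkk (by exact_mod_cast hcon)
              simp only [List.map_cons, List.mem_cons, hki, false_or]
          )
          (by
            rw [hsum', hsum]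
            simp only [List.map_cons, List.sum_cons]
            ring)
          (List.pairwise_cons.mp hpw).2
          (fun p hp => hmem p (List.mem_cons_of_mem _ hp))
          (by
            have h2 : (i :: rest'.map (fun p => p.1)).Nodup := by simpa using hnd
            exact (List.nodup_cons.mp h2).2)
          (by
            intro k hk hkle
            have hm := hnp k hk hkle
            simp only [List.map_cons, List.mem_cons] at hm
            rcases hm with heq | hmem'
            · exfalso
              have : k = k₀ := by
                rw [hi] at heq; exact_mod_cast heq
              subst this
              omega
            · exact hmem')
        rw [hstepA, hrec, hsum']
        conv_rhs => simp only [pvBLoop]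
        rw [if_neg (by omega)]
        congr 1
        rw [hi]
        simp

-- ===== VERDICT (by name: the statement is the Claim_ definition above) =====
theorem init_heuristic_solutionW_spec : Claim_equal_init_heuristic_solutionW := by
  unfold Claim_equal_init_heuristic_solutionW
  intro capacity weights _ hpre
  unfold Spec_init_heuristic_solutionW init_heuristic_solutionW init_heuristic_solutionW_alt
  simp only []
  have hperm : (PySem.List.sorted (PySem.List.enumerate weights 0) (fun iw => -iw.2)
      false).Perm (PySem.List.enumerate weights 0) := PySem.List.sorted_perm _ _ _
  have hmemord : ∀ p ∈ PySem.List.sorted (PySem.List.enumerate weights 0)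
      (fun iw => -iw.2) false,
      ∃ (k : Nat) (hk : k < weights.length), p = ((k : Int), weights[k]) := by
    intro p hp
    have hm := (PySem.List.mem_sorted _ _ _ _).mp hp
    rw [PySem.List.mem_enumerate_iff] at hm
    obtain ⟨k, hk, hpk⟩ := hm
    exact ⟨k, hk, by simpa using hpk⟩
  have hfst : ∀ (k : Nat), k < weights.length → ((k : Int)) ∈
      (PySem.List.sorted (PySem.List.enumerate weights 0) (fun iw => -iw.2) false).map
        (fun p => p.1) := by
    intro k hk
    refine List.mem_map.mpr ⟨((k : Int), weights[k]), ?_, rfl⟩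
    exact (PySem.List.mem_sorted _ _ _ _).mpr
      ((PySem.List.mem_enumerate_iff _ _ _).mpr ⟨k, hk, by simp⟩)
  have hmain := pv_loop_eq capacity weights hpre
    (PySem.List.sorted (PySem.List.enumerate weights 0) (fun iw => -iw.2) false)
    weights.length weights (List.replicate weights.length 1)
    (by rw [PySem.List.length_sorted, PySem.List.length_enumerate])
    rfl
    (by
      intro k hk
      rw [List.getElem?_eq_getElem hk, if_pos (hfst k hk)])
    (by
      have h2 := (hperm.map (fun p => p.2)).sum_eq
      rw [PySem.List.map_snd_enumerate] at h2
      omega)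
    (pv_sorted_stable _ (PySem.List.pairwise_lt_enumerate weights 0))
    hmemord
    (by
      have h1 := hperm.map (fun p => p.1)
      rw [PySem.List.map_fst_enumerate] at h1
      exact h1.nodup_iff.mpr (PySem.List.nodup_pyRange_one _ _))
    (fun k hk _ => hfst k hk)
  rw [hmain]
  by_cases hs : weights.sum ≤ capacity
  · rw [if_pos hs]
    cases hord : PySem.List.sorted (PySem.List.enumerate weights 0) (fun iw => -iw.2) false with
    | nil => simp [pvBLoop]
    | cons hd tl =>
      obtain ⟨i, w⟩ := hd
      simp only [pvBLoop]
      rw [if_pos hs]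
  · rw [if_neg hs]
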